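-- pv_equiv track=rewrite | github.com/yunn3/recursion-problems | intermediate/107-findXTimes/main.py | findXTimes
-- ===== SOURCE A (Python) =====
-- def findXTimes(teams: list[str]) -> bool:
--     match_count_map = {}
--
--     for team in teams:
--         if team not in match_count_map:
--             match_count_map[team] = 1
--
--         else:
--             match_count_map[team] += 1
--
--     for match_count in match_count_map.values():
--         if match_count != match_count_map[teams[0]]:
--             return False
--
--     return True
-- ===== SOURCE B (Python) =====
-- def findXTimes(teams: list[str]) -> bool:
--     s = sorted(teams)
--     runs = []
--     i = 0
--     n = len(s)
--     while i < n:
--         j = i + 1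
--         while j < n and s[j] == s[i]:
--             j += 1
--         runs.append(j - i)
--         i = j
--     return all(r == runs[0] for r in runs)
-- ===== Notes on version B (the rewrite author's own statement) =====
-- stated objective: alternative
-- what changed: B replaces A's hash-map counting (dict built in one pass, then values compared to the count of teams[0]) with sort-then-scan: sort the list, measure the length of every run of consecutive equal strings, and check every run length equals the first one.
import Mathlib
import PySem

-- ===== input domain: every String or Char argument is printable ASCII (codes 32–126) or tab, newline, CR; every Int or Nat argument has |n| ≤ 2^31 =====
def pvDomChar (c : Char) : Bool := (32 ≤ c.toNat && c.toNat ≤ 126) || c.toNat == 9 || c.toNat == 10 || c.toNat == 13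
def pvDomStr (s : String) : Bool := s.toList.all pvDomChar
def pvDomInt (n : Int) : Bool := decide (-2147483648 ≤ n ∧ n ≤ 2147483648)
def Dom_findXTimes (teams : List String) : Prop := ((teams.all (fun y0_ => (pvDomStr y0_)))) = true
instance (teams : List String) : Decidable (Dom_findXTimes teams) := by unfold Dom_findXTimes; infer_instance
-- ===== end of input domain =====

-- B replaces A's dict counting by sort-then-scan over runs of equal strings (objective: alternative; same results).

-- ===== PORT A =====
-- A: build a dict team ↦ occurrence count, then check every value equals the count of teams[0].
-- 'teams[0]' is only evaluated when the dict has values (so teams ≠ []); the pyGetD/getD defaults below are never reached then.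
def findXTimes (teams : List String) : Bool :=
  let m : PySem.Dict String Int :=
    teams.foldl (fun d team =>
      if d.contains team = false then d.insert team 1
      else d.insert team (d.getD team 0 + 1)) PySem.Dict.empty
  (PySem.Dict.values m).all (fun c => c == m.getD (PySem.List.pyGetD teams 0 "") 0)

-- ===== PORT B =====
-- run lengths of maximal blocks of consecutive equal strings (Source B's while-loop scan)
def pvRunLens : List String → List Nat
  | [] => []
  | x :: xs =>
      (1 + (xs.takeWhile (fun y => y == x)).length) :: pvRunLens (xs.dropWhile (fun y => y == x))
  termination_by l => l.length
  decreasing_by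
    exact Nat.lt_succ_of_le (List.length_dropWhile_le _ _)

def findXTimes_alt (teams : List String) : Bool :=
  let s := PySem.List.sorted teams (fun x => x) false
  let runs := pvRunLens s
  match runs with
  | [] => true                                  -- all(...) over an empty generator; runs[0] never evaluated
  | r0 :: _ => runs.all (fun r => r == r0)

-- ===== PRECONDITION & SPEC =====
def Spec_findXTimes (teams : List String) (out : Bool) : Prop := out = findXTimes_alt teams
instance (teams : List String) (out : Bool) : Decidable (Spec_findXTimes teams out) := by unfold Spec_findXTimes; infer_instance

-- ===== CLAIM (what is proved, stated in full; the proofs are below) =====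
def Claim_equal_findXTimes : Prop := ∀ (teams : List String), Dom_findXTimes teams → Spec_findXTimes teams (findXTimes teams)

-- ===== LEMMAS AND PROOFS =====

-- the common mathematical content of both programs: every element occurs equally often
def pvEqCounts (l : List String) : Prop := ∀ a ∈ l, ∀ b ∈ l, l.count a = l.count b

theorem pvA_true_iff (teams : List String) :
    findXTimes teams = true ↔ pvEqCounts teams := by
  unfold findXTimes
  have hm : teams.foldl (fun d team =>
        if d.contains team = false then d.insert team 1
        else d.insert team (d.getD team 0 + 1)) PySem.Dict.empty
      = PySem.Dict.counter teams := by
    rw [PySem.List.foldl_congr_mem (g := fun d x => d.insert x (d.getD x 0 + 1))]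
    · exact PySem.Dict.foldl_insert_getD_add_one_eq_counter teams
    · intro d x hx
      by_cases hc : d.contains x = false
      · simp [pysem, hc]
      · simp [hc]
  simp only [hm]
  cases teams with
  | nil => simp [pvEqCounts, PySem.Dict.counter, PySem.Dict.empty, PySem.Dict.values]
  | cons t0 rest =>
      have h0 : PySem.List.pyGetD (t0 :: rest) 0 "" = t0 := by
        simp [PySem.List.pyGetD, PySem.List.pyGet?, PySem.List.pyIdx?]
      rw [h0, PySem.Dict.getD_counter]
      simp only [PySem.Dict.values, PySem.Dict.items_counter, List.map_map, List.all_map,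
        List.all_eq_true, Function.comp]
      constructor
      · intro h a ha b hb
        have hma := h a (by simpa [PySem.Set.mem_ofList] using ha)
        have hmb := h b (by simpa [PySem.Set.mem_ofList] using hb)
        simp only [beq_iff_eq, Nat.cast_inj] at hma hmb
        omega
      · intro h k hk
        have : (t0 :: rest).count k = (t0 :: rest).count t0 :=
          h k (by simpa [PySem.Set.mem_ofList] using hk) t0 (by simp)
        simp [this]

theorem pv_not_mem_drop (x : String) (xs : List String)
    (hpw : (x :: xs).Pairwise (· ≤ ·)) : x ∉ xs.dropWhile (fun y => y == x) := by
  cases hd : xs.dropWhile (fun y => y == x) with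
  | nil => simp
  | cons h tl =>
      have hh : (h == x) = false := by
        have h0 : 0 < (xs.dropWhile (fun y => y == x)).length := by simp [hd]
        have := List.dropWhile_get_zero_not (fun y => y == x) xs h0
        simp [hd] at this
        simpa using this
      have hhx : h ≠ x := by simpa using hh
      have hsub : (h :: tl).Sublist xs := hd ▸ List.dropWhile_sublist _
      have hge : ∀ y ∈ xs, x ≤ y := (List.pairwise_cons.mp hpw).1
      have hxh : x < h := lt_of_le_of_ne (hge h (hsub.mem (by simp))) (Ne.symm hhx)
      have hpw' : (h :: tl).Pairwise (· ≤ ·) :=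
        ((List.pairwise_cons.mp hpw).2).sublist hsub
      intro hmem
      rcases List.mem_cons.mp hmem with rfl | hmem'
      · exact absurd rfl hhx.symm
      · have : h ≤ x := (List.pairwise_cons.mp hpw').1 x hmem'
        exact absurd (lt_of_lt_of_le hxh this) (lt_irrefl x)

theorem pv_count_head (x : String) (xs : List String)
    (hpw : (x :: xs).Pairwise (· ≤ ·)) :
    (x :: xs).count x = 1 + (xs.takeWhile (fun y => y == x)).length := by
  have htd := (List.takeWhile_append_dropWhile (p := fun y => y == x) (l := xs))
  have hct : (xs.takeWhile (fun y => y == x)).count x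
      = (xs.takeWhile (fun y => y == x)).length := by
    apply List.count_eq_length.mpr
    intro y hy
    have hyx : y = x := by simpa using List.mem_takeWhile_imp hy
    exact hyx.symm
  have hcd : (xs.dropWhile (fun y => y == x)).count x = 0 :=
    List.count_eq_zero.mpr (pv_not_mem_drop x xs hpw)
  calc (x :: xs).count x = xs.count x + 1 := by simp
    _ = 1 + (xs.takeWhile (fun y => y == x)).length := by
        conv_lhs => rw [← htd]
        rw [List.count_append, hct, hcd]
        omega

theorem pv_run_all (c : Nat) : ∀ s : List String, s.Pairwise (· ≤ ·) →
    (((pvRunLens s).all (fun r => r == c) = true) ↔ ∀ y ∈ s, s.count y = c) := by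
  intro s
  induction s using pvRunLens.induct with
  | case1 => simp [pvRunLens]
  | case2 x xs ih =>
      intro hpw
      have hsubd : (xs.dropWhile (fun y => y == x)).Sublist (x :: xs) :=
        (List.dropWhile_sublist _).trans (List.sublist_cons_self x xs)
      have hpwd : (xs.dropWhile (fun y => y == x)).Pairwise (· ≤ ·) :=
        hpw.sublist hsubd
      have hnd := pv_not_mem_drop x xs hpw
      have c2 : ∀ y ∈ xs.dropWhile (fun y => y == x),
          (x :: xs).count y = (xs.dropWhile (fun y => y == x)).count y := by
        intro y hy
        have hyx : y ≠ x := fun h => hnd (h ▸ hy)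
        have hnt : y ∉ xs.takeWhile (fun y => y == x) := by
          intro ht
          exact hyx (by simpa using List.mem_takeWhile_imp ht)
        have : xs.count y = (xs.takeWhile (fun y => y == x)).count y
            + (xs.dropWhile (fun y => y == x)).count y := by
          conv_lhs => rw [← List.takeWhile_append_dropWhile (p := fun y => y == x) (l := xs)]
          rw [List.count_append]
        have hcy : (x :: xs).count y = xs.count y := by simp [Ne.symm hyx]
        rw [hcy, this, List.count_eq_zero.mpr hnt, Nat.zero_add]
      rw [pvRunLens]
      simp only [List.all_cons, Bool.and_eq_true, beq_iff_eq]
      rw [ih hpwd]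
      constructor
      · rintro ⟨h1, h2⟩ y hy
        rcases List.mem_cons.mp hy with heq | hy'
        · subst heq; rw [pv_count_head y xs hpw]; omega
        · rw [← List.takeWhile_append_dropWhile (p := fun y => y == x) (l := xs)] at hy'
          rcases List.mem_append.mp hy' with ht | hd
          · have hyx : y = x := by simpa using List.mem_takeWhile_imp ht
            subst hyx
            rw [pv_count_head y xs hpw]; omega
          · rw [c2 y hd]; exact h2 y hd
      · intro h
        constructor
        · have := h x (by simp)
          rw [pv_count_head x xs hpw] at this; omega
        · intro y hy
          rw [← c2 y hy]
          exact h y (hsubd.mem hy)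

theorem pvB_true_iff (teams : List String) :
    findXTimes_alt teams = true ↔ pvEqCounts teams := by
  unfold findXTimes_alt
  have hperm : (PySem.List.sorted teams (fun x => x) false).Perm teams :=
    PySem.List.sorted_perm teams (fun x => x) false
  have hpw : (PySem.List.sorted teams (fun x => x) false).Pairwise (· ≤ ·) := by
    simpa using PySem.List.sorted_pairwise (xs := teams) (key := fun x => x)
  cases hs : PySem.List.sorted teams (fun x => x) false with
  | nil =>
      have ht : teams = [] := ((hs ▸ hperm).symm).eq_nil
      have h0 : pvRunLens [] = [] := by rw [pvRunLens]
      simp [h0, ht, pvEqCounts]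
  | cons x xs =>
      rw [hs] at hperm hpw
      have hrun : pvRunLens (x :: xs)
          = (1 + (xs.takeWhile (fun y => y == x)).length)
              :: pvRunLens (xs.dropWhile (fun y => y == x)) := by
        rw [pvRunLens]
      simp only [hrun]
      rw [← hrun]
      rw [pv_run_all (1 + (xs.takeWhile (fun y => y == x)).length) (x :: xs) hpw]
      have hcx := pv_count_head x xs hpw
      constructor
      · intro h a ha b hb
        have ha' := h a (hperm.mem_iff.mpr ha)
        have hb' := h b (hperm.mem_iff.mpr hb)
        rw [← hperm.count_eq, ← hperm.count_eq (a := b)] at *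
        omega
      · intro h y hy
        have hx : x ∈ teams := hperm.mem_iff.mp (by simp)
        have hy' : y ∈ teams := hperm.mem_iff.mp hy
        have := h y hy' x hx
        rw [← hperm.count_eq, ← hperm.count_eq (a := x)] at this
        omega

-- ===== VERDICT (by name: the statement is the Claim_ definition above) =====
theorem findXTimes_spec : Claim_equal_findXTimes := by
  intro teams _
  unfold Spec_findXTimes
  exact Bool.eq_iff_iff.mpr ((pvA_true_iff teams).trans (pvB_true_iff teams).symm)
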